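-- pv_equiv track=rewrite | github.com/Vamsithadi/codemind-python | Minimum_absolute_difference_between_N_and_a_power_of_2.py | po
-- ===== SOURCE A (Python) =====
-- def po(n):
--   c=[]
--   for i in range(n):
--     d=2**i
--     c.append(d)
--   if n in c:
--     return 0
--   g=[]
--   for i in c:
--     g.append(abs(n-i))
--   return min(g)
-- ===== SOURCE B (Python) =====
-- def po(n):
--   # nearest power of 2 not above n via bit_length; compare it and the next power
--   low = 1 << (n.bit_length() - 1)
--   if low == n:
--     return 0
--   return min(n - low, 2 * low - n)
-- ===== Notes on version B (the rewrite author's own statement) =====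
-- stated objective: faster
-- what changed: Instead of materialising the list of the first n powers of two and a second list of all n absolute differences and scanning it with min, B gets the nearest power of two below/at n directly from n.bit_length() and compares just the two neighbouring powers.
import Mathlib
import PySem

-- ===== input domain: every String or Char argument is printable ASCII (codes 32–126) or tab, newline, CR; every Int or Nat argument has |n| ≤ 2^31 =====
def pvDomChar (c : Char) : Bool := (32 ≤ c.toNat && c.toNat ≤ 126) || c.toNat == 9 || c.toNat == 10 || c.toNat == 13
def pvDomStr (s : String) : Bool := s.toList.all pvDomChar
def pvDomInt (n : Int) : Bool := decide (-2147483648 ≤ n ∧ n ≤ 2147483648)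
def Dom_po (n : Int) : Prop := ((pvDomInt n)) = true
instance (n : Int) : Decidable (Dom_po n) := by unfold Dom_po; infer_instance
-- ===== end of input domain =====

-- B replaces A's two O(n)-long lists and the min scan by a bit_length lookup of the
-- two neighbouring powers of two (objective: faster, asymptotic).

-- ===== PORT A =====
def po (n : Int) : Int :=
  -- c = [2**i for i in range(n)]  (i ≥ 0 inside range(n), so 2**i is 2 ^ i.toNat)
  let c := (PySem.List.pyRange 0 n 1).foldl (fun acc i => acc ++ [(2 : Int) ^ i.toNat]) []
  if n ∈ c then 0
  else
    let g := c.foldl (fun acc i => acc ++ [|n - i|]) []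
    -- min(g); min([]) raises ValueError (n ≤ 0), excluded by Pre_po
    (PySem.List.min? g (fun x => x)).getD 0

-- ===== PORT B =====
def po_alt (n : Int) : Int :=
  -- low = 1 << (n.bit_length() - 1)
  let low : Int := 2 ^ (PySem.Int.bitLength n - 1)
  if low == n then 0
  else min (n - low) (2 * low - n)

-- ===== PRECONDITION & SPEC =====
-- A raises ValueError (min of an empty list) for every n ≤ 0; Pre_po excludes exactly those.
def Pre_po (n : Int) : Prop := 1 ≤ n
instance (n : Int) : Decidable (Pre_po n) := by unfold Pre_po; infer_instance
def pvWitness_po : Int := (5)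

def Spec_po (n : Int) (out : Int) : Prop := out = po_alt n
instance (n : Int) (out : Int) : Decidable (Spec_po n out) := by unfold Spec_po; infer_instance

-- ===== CLAIM (what is proved, stated in full; the proofs are below) =====
def Claim_equal_po : Prop := ∀ (n : Int), Dom_po n → Pre_po n → Spec_po n (po n)

-- ===== LEMMAS AND PROOFS =====

theorem pv_bit_le (n : Int) (h : 1 ≤ n) :
    (2 : Int) ^ (PySem.Int.bitLength n - 1) ≤ n := by
  have h0 : n ≠ 0 := by omega
  have := PySem.Int.two_pow_bitLength_le n h0
  have hab : (n.natAbs : Int) = n := Int.natAbs_of_nonneg (by omega)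
  calc (2 : Int) ^ (PySem.Int.bitLength n - 1)
      = ((2 ^ (PySem.Int.bitLength n - 1) : ℕ) : Int) := by push_cast; ring
    _ ≤ (n.natAbs : Int) := by exact_mod_cast this
    _ = n := hab

theorem pv_bit_lt (n : Int) (h : 1 ≤ n) :
    n < (2 : Int) ^ (PySem.Int.bitLength n - 1 + 1) := by
  have h1 : n.natAbs < 2 ^ PySem.Int.bitLength n := PySem.Int.lt_two_pow_bitLength n
  have hbl : 1 ≤ PySem.Int.bitLength n := by
    by_contra hb
    have : PySem.Int.bitLength n = 0 := by omega
    rw [this] at h1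
    omega
  have heq : PySem.Int.bitLength n - 1 + 1 = PySem.Int.bitLength n := by omega
  rw [heq]
  have hab : (n.natAbs : Int) = n := Int.natAbs_of_nonneg (by omega)
  calc n = (n.natAbs : Int) := hab.symm
    _ < ((2 ^ PySem.Int.bitLength n : ℕ) : Int) := by exact_mod_cast h1
    _ = (2 : Int) ^ PySem.Int.bitLength n := by push_cast; ring

theorem pv_L_lt_pow (L : ℕ) : (L : Int) < 2 ^ L := by
  exact_mod_cast Nat.lt_two_pow_self

-- the only power of 2 in [2^L, 2^(L+1)) is 2^L
theorem pv_pow_unique (L k : ℕ) (h1 : (2:Int) ^ L ≤ 2 ^ k) (h2 : (2:Int) ^ k < 2 ^ (L+1)) :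
    k = L := by
  have hl : L ≤ k := by
    have := (pow_le_pow_iff_right₀ (by norm_num : (1:Int) < 2)).mp h1
    exact this
  have hr : k < L + 1 := by
    have := (pow_lt_pow_iff_right₀ (by norm_num : (1:Int) < 2)).mp h2
    exact this
  omega

theorem pv_main (n : Int) (h : 1 ≤ n) : po n = po_alt n := by
  set L : ℕ := PySem.Int.bitLength n - 1 with hL
  have hle : (2 : Int) ^ L ≤ n := pv_bit_le n h
  have hlt : n < (2 : Int) ^ (L + 1) := pv_bit_lt n h
  unfold po po_alt
  simp only [PySem.List.foldl_append_singleton_eq_map, List.nil_append, beq_iff_eq]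
  rw [← hL]
  by_cases hpow : (2 : Int) ^ L = n
  · -- n is a power of two: membership in c holds
    have hmem : n ∈ (PySem.List.pyRange 0 n 1).map (fun i => (2 : Int) ^ i.toNat) := by
      refine List.mem_map.mpr ⟨(L : Int), ?_, ?_⟩
      · refine (PySem.List.mem_pyRange_one).mpr ⟨by positivity, ?_⟩
        calc (L : Int) < 2 ^ L := pv_L_lt_pow L
          _ = n := hpow
      · simpa using hpow
    simp [hmem, hpow]
  · -- n is not a power of two
    have hslt : (2 : Int) ^ L < n := lt_of_le_of_ne hle hpow
    have hmem : n ∉ (PySem.List.pyRange 0 n 1).map (fun i => (2 : Int) ^ i.toNat) := by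
      intro hmem
      obtain ⟨i, hi, hfi⟩ := List.mem_map.mp hmem
      obtain ⟨hi0, hin⟩ := (PySem.List.mem_pyRange_one).mp hi
      have hk := pv_pow_unique L i.toNat (by rw [hfi]; exact hle) (by rw [hfi]; exact hlt)
      rw [hk] at hfi
      exact hpow hfi
    simp only [hmem, if_false]
    rw [if_neg (by exact fun he => hpow he)]
    -- g is nonempty: obtain the minimum
    have hL1n : (L : Int) + 1 < n := by
      have := pv_L_lt_pow L
      omega
    have hg : ∃ m, PySem.List.min? (((PySem.List.pyRange 0 n 1).map
        (fun i => (2 : Int) ^ i.toNat)).map (fun i => |n - i|)) (fun x => x) = some m := by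
      cases hm : PySem.List.min? (((PySem.List.pyRange 0 n 1).map
          (fun i => (2 : Int) ^ i.toNat)).map (fun i => |n - i|)) (fun x => x) with
      | none =>
        exfalso
        have := (PySem.List.min?_eq_none_iff _ _).mp hm
        have h0 : (0 : Int) ∈ PySem.List.pyRange 0 n 1 :=
          (PySem.List.mem_pyRange_one).mpr ⟨le_refl _, by omega⟩
        have : ((2:Int)^(0:Int).toNat) ∈ ((PySem.List.pyRange 0 n 1).map (fun i => (2 : Int) ^ i.toNat)) :=
          List.mem_map.mpr ⟨0, h0, rfl⟩
        simp_all
      | some m => exact ⟨m, rfl⟩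
    obtain ⟨m, hm⟩ := hg
    rw [hm, Option.getD_some]
    -- membership of the two neighbours in g
    have hgmem : ∀ (j : Int), 0 ≤ j → j < n →
        |n - 2 ^ j.toNat| ∈ (((PySem.List.pyRange 0 n 1).map
          (fun i => (2 : Int) ^ i.toNat)).map (fun i => |n - i|)) := by
      intro j hj0 hjn
      refine List.mem_map.mpr ⟨2 ^ j.toNat, List.mem_map.mpr ⟨j, ?_, rfl⟩, rfl⟩
      exact (PySem.List.mem_pyRange_one).mpr ⟨hj0, hjn⟩
    have hmin := PySem.List.min?_isMin hm
    -- upper bounds: m ≤ n - 2^L and m ≤ 2^(L+1) - n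
    have hub1 : m ≤ n - 2 ^ L := by
      have := hmin _ (hgmem (L : Int) (by positivity) (by omega))
      simp only [Int.toNat_natCast] at this
      rwa [abs_of_nonneg (by omega)] at this
    have hub2 : m ≤ 2 ^ (L + 1) - n := by
      have := hmin _ (hgmem ((L : Int) + 1) (by positivity) hL1n)
      have ht : ((L : Int) + 1).toNat = L + 1 := by omega
      rw [ht, abs_of_nonpos (by omega)] at this
      omega
    -- lower bound: every element of g is ≥ min (n - 2^L) (2^(L+1) - n)
    have hlb : min (n - 2 ^ L) (2 ^ (L + 1) - n) ≤ m := by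
      obtain ⟨x, hx, hxm⟩ := List.mem_map.mp (PySem.List.min?_mem hm)
      obtain ⟨i, hi, hfi⟩ := List.mem_map.mp hx
      obtain ⟨hi0, hin⟩ := (PySem.List.mem_pyRange_one).mp hi
      subst hxm
      rw [← hfi]
      by_cases hcase : i.toNat ≤ L
      · have hp : (2 : Int) ^ i.toNat ≤ 2 ^ L :=
          pow_le_pow_right₀ (by norm_num) hcase
        rw [abs_of_nonneg (by omega)]
        have : n - 2 ^ L ≤ n - 2 ^ i.toNat := by omega
        exact le_trans (min_le_left _ _) this
      · have hp : (2 : Int) ^ (L + 1) ≤ 2 ^ i.toNat :=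
          pow_le_pow_right₀ (by norm_num) (by omega)
        rw [abs_of_nonpos (by omega)]
        have : 2 ^ (L + 1) - n ≤ 2 ^ i.toNat - n := by omega
        exact le_trans (min_le_right _ _) (by omega)
    have h2L : (2 : Int) * 2 ^ L = 2 ^ (L + 1) := by ring
    rw [h2L]
    omega

-- ===== VERDICT (by name: the statement is the Claim_ definition above) =====
theorem po_spec : Claim_equal_po := by
  intro n _ hpre
  unfold Spec_po
  exact pv_main n hpre
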